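-- pv_equiv track=rewrite | github.com/intzy/ProjectEuler | src/pb147.py | num_offset_diagonals_last_column
-- ===== SOURCE A (Python) =====
-- def num_offset_diagonals_last_column(base, height):
--     diag_base = 2 * (base - 1)
--     ans = 0
--     for i, h in enumerate(range(height, 0, -1)):
--         i = min(2 * i + 1, diag_base)
--         for b in range(i):
--             ans += min(2 * h - 1, diag_base - b)
--     return ans
-- ===== SOURCE B (Python) =====
-- def num_offset_diagonals_last_column(base, height):
--     # Closed-form inner sum: O(height) instead of O(height*base)
--     d = 2 * (base - 1)
--     ans = 0
--     for i in range(height):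
--         m = min(2 * i + 1, d)
--         if m <= 0:
--             continue
--         c = 2 * (height - i) - 1
--         t = min(max(d - c + 1, 0), m)
--         ans += t * c + (m - t) * d - (m - 1 + t) * (m - t) // 2
--     return ans
-- ===== Notes on version B (the rewrite author's own statement) =====
-- stated objective: faster
-- what changed: The inner loop over b is replaced by a closed-form piecewise arithmetic-series formula for sum(min(2h-1, diag_base-b)), so each row costs O(1).
import Mathlib
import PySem

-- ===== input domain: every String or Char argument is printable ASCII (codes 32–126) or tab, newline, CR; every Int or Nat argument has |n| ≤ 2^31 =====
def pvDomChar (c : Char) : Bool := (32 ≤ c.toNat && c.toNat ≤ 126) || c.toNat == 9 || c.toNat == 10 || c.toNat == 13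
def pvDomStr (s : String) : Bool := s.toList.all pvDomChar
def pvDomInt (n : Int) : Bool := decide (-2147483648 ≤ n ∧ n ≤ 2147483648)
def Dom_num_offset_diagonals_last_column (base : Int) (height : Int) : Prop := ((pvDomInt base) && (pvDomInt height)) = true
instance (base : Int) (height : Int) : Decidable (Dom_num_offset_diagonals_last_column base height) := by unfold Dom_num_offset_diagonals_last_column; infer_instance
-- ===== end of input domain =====

-- B replaces A's inner b-loop by a closed-form piecewise sum of min(2h-1, diag_base-b): O(height) instead of O(height*base).

-- ===== PORT A =====
def num_offset_diagonals_last_column (base : Int) (height : Int) : Int :=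
  let diag_base := 2 * (base - 1)
  (PySem.List.enumerate (PySem.List.pyRange height 0 (-1)) 0).foldl
    (fun ans p =>
      let i := min (2 * p.1 + 1) diag_base
      (PySem.List.pyRange 0 i 1).foldl
        (fun a b => a + min (2 * p.2 - 1) (diag_base - b)) ans) 0

-- ===== PORT B =====
def num_offset_diagonals_last_column_alt (base : Int) (height : Int) : Int :=
  let d := 2 * (base - 1)
  (PySem.List.pyRange 0 height 1).foldl
    (fun ans i =>
      let m := min (2 * i + 1) d
      if m ≤ 0 then ans
      else
        let c := 2 * (height - i) - 1
        let t := min (max (d - c + 1) 0) m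
        ans + (t * c + (m - t) * d - PySem.Int.floordiv ((m - 1 + t) * (m - t)) 2)) 0

-- ===== PRECONDITION & SPEC =====
def Spec_num_offset_diagonals_last_column (base : Int) (height : Int) (out : Int) : Prop := out = num_offset_diagonals_last_column_alt base height
instance (base : Int) (height : Int) (out : Int) : Decidable (Spec_num_offset_diagonals_last_column base height out) := by unfold Spec_num_offset_diagonals_last_column; infer_instance

-- ===== CLAIM (what is proved, stated in full; the proofs are below) =====
def Claim_equal_num_offset_diagonals_last_column : Prop := ∀ (base : Int) (height : Int), Dom_num_offset_diagonals_last_column base height → Spec_num_offset_diagonals_last_column base height (num_offset_diagonals_last_column base height)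

-- ===== LEMMAS AND PROOFS =====

-- Doubled closed form of the inner sum (doubling avoids division during the induction).
theorem pv_two_sumMin (c d : Int) : ∀ n : Nat,
    2 * (((PySem.List.pyRange 0 (n : Int) 1).map (fun b => min c (d - b))).sum)
      = 2 * (min (max (d - c + 1) 0) (n : Int)) * c
        + 2 * ((n : Int) - min (max (d - c + 1) 0) (n : Int)) * d
        - ((n : Int) - 1 + min (max (d - c + 1) 0) (n : Int)) * ((n : Int) - min (max (d - c + 1) 0) (n : Int)) := by
  intro n
  induction n with
  | zero =>
    rw [PySem.List.pyRange_one_eq_nil (by omega)]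
    have ht : min (max (d - c + 1) 0) ((0 : Nat) : Int) = 0 := by omega
    rw [ht]; simp
  | succ n IH =>
    have hcast : (((n + 1 : Nat)) : Int) = (n : Int) + 1 := by push_cast; ring
    rw [hcast, PySem.List.pyRange_one_succ_right (by omega), List.map_append, List.sum_append]
    simp only [List.map_cons, List.map_nil, List.sum_cons, List.sum_nil]
    set u := d - c + 1 with hu
    by_cases h1 : u ≤ 0
    · have ht : min (max u 0) ((n : Int)) = 0 := by omega
      have ht' : min (max u 0) ((n : Int) + 1) = 0 := by omega
      have hm : min c (d - (n : Int)) = d - (n : Int) := by omega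
      rw [ht'] at *
      rw [hm]
      rw [ht] at IH
      linear_combination IH
    · by_cases h2 : (n : Int) + 1 ≤ u
      · have ht : min (max u 0) ((n : Int)) = (n : Int) := by omega
        have ht' : min (max u 0) ((n : Int) + 1) = (n : Int) + 1 := by omega
        have hm : min c (d - (n : Int)) = c := by omega
        rw [ht', hm]; rw [ht] at IH
        linear_combination IH
      · have ht : min (max u 0) ((n : Int)) = u := by omega
        have ht' : min (max u 0) ((n : Int) + 1) = u := by omega
        have hm : min c (d - (n : Int)) = d - (n : Int) := by omega
        rw [ht', hm]; rw [ht] at IH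
        linear_combination IH

-- Closed form of the inner sum, with Python's floor division, for a positive bound m.
theorem pv_sumMin_closed (c d m : Int) (hm : 0 < m) :
    ((PySem.List.pyRange 0 m 1).map (fun b => min c (d - b))).sum
      = (min (max (d - c + 1) 0) m) * c + (m - min (max (d - c + 1) 0) m) * d
        - PySem.Int.floordiv ((m - 1 + min (max (d - c + 1) 0) m) * (m - min (max (d - c + 1) 0) m)) 2 := by
  obtain ⟨n, rfl⟩ : ∃ n : Nat, (n : Int) = m := ⟨m.toNat, by omega⟩
  have H := pv_two_sumMin c d n
  set t := min (max (d - c + 1) 0) ((n : Int)) with hts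
  set S := ((PySem.List.pyRange 0 (n : Int) 1).map (fun b => min c (d - b))).sum with hS
  have hprod : ((n : Int) - 1 + t) * ((n : Int) - t) = 2 * (t * c + ((n : Int) - t) * d - S) := by
    linarith
  rw [hprod, PySem.Int.floordiv_eq_ediv_of_pos (by norm_num),
    Int.mul_ediv_cancel_left _ (by norm_num : (2:Int) ≠ 0)]
  ring

theorem pv_enum_map_range (f : Nat → Int) (s : Int) : ∀ n : Nat,
    PySem.List.enumerate ((List.range n).map f) s
      = (List.range n).map (fun (k : Nat) => (s + (k : Int), f k)) := by
  intro n
  induction n with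
  | zero => simp [PySem.List.enumerate]
  | succ n IH =>
    rw [List.range_succ, List.map_append, PySem.List.enumerate_append, IH, List.map_append]
    simp [PySem.List.enumerate_cons, PySem.List.enumerate_nil]

-- ===== VERDICT (by name: the statement is the Claim_ definition above) =====
theorem num_offset_diagonals_last_column_spec : Claim_equal_num_offset_diagonals_last_column := by
  intro base height _
  unfold Spec_num_offset_diagonals_last_column
  unfold num_offset_diagonals_last_column num_offset_diagonals_last_column_alt
  set d := 2 * (base - 1) with hd
  by_cases hh : height ≤ 0
  · rw [PySem.List.pyRange_neg_one_eq_nil (by omega), PySem.List.pyRange_one_eq_nil (by omega)]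
    simp [PySem.List.enumerate]
  · push_neg at hh
    rw [PySem.List.pyRange_neg_one, PySem.List.pyRange_one]
    simp only [sub_zero]
    rw [pv_enum_map_range, List.foldl_map, List.foldl_map]
    apply PySem.List.foldl_congr_mem
    intro acc k _
    simp only [zero_add]
    set m := min (2 * (k : Int) + 1) d with hm
    by_cases hm0 : m ≤ 0
    · rw [PySem.List.pyRange_one_eq_nil (by omega)]
      simp [hm0]
    · rw [if_neg hm0]
      push_neg at hm0
      rw [PySem.List.foldl_add, pv_sumMin_closed _ _ _ hm0]
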